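-- pv_equiv track=rewrite | github.com/konstantinos2018/rename-consec | renamepy/renamefuncs.py | name_change
-- ===== SOURCE A (Python) =====
-- def name_change(fnames, fdate_diff):
--     """ Change the names of the files to the new desired names with the
--     addition of the prefix
--
--     Args:
--         fnames -- list of strings of  the filenames
--         fdate_diff -- list of strings of the filenames
--
--     Returns:
--         fnames_new -- list of strings of the new filenames
--     """
--
--     # Initialization
--     k = 0
--     flag_ddiff = fdate_diff[0]  # flag
--     fnames_new = []
--
--     for name, ddiff in zip(fnames, fdate_diff):
--
--         if flag_ddiff == ddiff:
--             s = 'Day_{0}_{1}_{2}'.format(ddiff, k, name)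
--             fnames_new.append(s)
--             k = k + 1
--
--         else:
--             k = 0
--             flag_ddiff = ddiff
--             s = 'Day_{0}_{1}_{2}'.format(ddiff, k, name)
--             fnames_new.append(s)
--             k = k + 1
--
--     return fnames_new
-- ===== SOURCE B (Python) =====
-- def name_change(fnames, fdate_diff):
--     """Run-splitting rewrite: slice the zipped (name, ddiff) pairs into maximal
--     runs of equal ddiff and number each run from 0, instead of A's flag/counter
--     state machine. Returns [] when fdate_diff is empty (A raises IndexError)."""
--     pairs = list(zip(fnames, fdate_diff))
--     out = []
--     i = 0
--     n = len(pairs)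
--     while i < n:
--         d = pairs[i][1]
--         j = i
--         while j < n and pairs[j][1] == d:
--             out.append('Day_{0}_{1}_{2}'.format(d, j - i, pairs[j][0]))
--             j += 1
--         i = j
--     return out
-- ===== Notes on version B (the rewrite author's own statement) =====
-- stated objective: alternative
-- what changed: Replaces A's flag/counter state machine with a run-splitting traversal: the zipped (name, ddiff) pairs are cut into maximal runs of equal ddiff and each run is numbered from 0.
import Mathlib
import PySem

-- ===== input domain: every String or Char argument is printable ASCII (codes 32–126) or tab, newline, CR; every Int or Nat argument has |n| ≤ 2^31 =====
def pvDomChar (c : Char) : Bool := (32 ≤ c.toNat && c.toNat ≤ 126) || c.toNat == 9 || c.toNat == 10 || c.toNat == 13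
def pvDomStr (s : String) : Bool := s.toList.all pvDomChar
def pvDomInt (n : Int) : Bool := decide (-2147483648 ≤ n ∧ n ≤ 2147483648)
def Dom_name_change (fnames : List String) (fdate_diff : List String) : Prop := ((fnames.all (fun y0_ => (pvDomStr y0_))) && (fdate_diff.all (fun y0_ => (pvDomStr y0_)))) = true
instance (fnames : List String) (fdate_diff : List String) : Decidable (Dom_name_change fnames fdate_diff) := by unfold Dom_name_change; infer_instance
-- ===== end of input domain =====

-- B replaces A's flag/counter state machine with a run-splitting traversal of the zipped pairs (objective: alternative, same cost).

-- 'Day_{0}_{1}_{2}'.format(ddiff, k, name) — str.format on a str, an int and a str is exact concatenation with str(k)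
def pvFmt (ddiff : String) (k : Int) (name : String) : String :=
  "Day_" ++ ddiff ++ "_" ++ PySem.Int.toStr k ++ "_" ++ name

-- ===== PORT A =====
-- the for-loop over zip(fnames, fdate_diff) with state (flag_ddiff, k, fnames_new)
def pvAGo (flag : String) (k : Int) (acc : List String) : List (String × String) → List String
  | [] => acc
  | (name, ddiff) :: rest =>
    if flag == ddiff then
      pvAGo flag (k + 1) (acc ++ [pvFmt ddiff k name]) rest
    else
      pvAGo ddiff 1 (acc ++ [pvFmt ddiff 0 name]) rest

def name_change (fnames : List String) (fdate_diff : List String) : List String :=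
  match fdate_diff with
  | [] => []  -- fdate_diff[0] raises IndexError here; excluded by Pre_name_change
  | d0 :: _ => pvAGo d0 0 [] (List.zip fnames fdate_diff)

-- ===== PORT B =====
-- inner while loop: emit the run of pairs whose ddiff equals d, counters k, k+1, …; return (emitted, remaining pairs)
def pvBEmit (d : String) (k : Int) : List (String × String) → List String × List (String × String)
  | [] => ([], [])
  | (name, dd) :: rest =>
    if dd == d then
      let pr := pvBEmit d (k + 1) rest
      (pvFmt d k name :: pr.1, pr.2)
    else ([], (name, dd) :: rest)

theorem pvBEmit_snd_length (d : String) (k : Int) (l : List (String × String)) :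
    (pvBEmit d k l).2.length ≤ l.length := by
  induction l generalizing k with
  | nil => simp [pvBEmit]
  | cons p rest ih =>
    obtain ⟨name, dd⟩ := p
    simp only [pvBEmit]
    split
    · exact Nat.le_succ_of_le (ih _)
    · simp

-- outer while loop over the runs of the zipped list
def pvBGo : List (String × String) → List String
  | [] => []
  | (name, dd) :: rest =>
    let pr := pvBEmit dd 1 rest
    (pvFmt dd 0 name :: pr.1) ++ pvBGo pr.2
termination_by l => l.length
decreasing_by
  simpa using Nat.lt_succ_of_le (pvBEmit_snd_length dd 1 rest)

def name_change_alt (fnames : List String) (fdate_diff : List String) : List String :=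
  pvBGo (List.zip fnames fdate_diff)

-- ===== PRECONDITION & SPEC =====
-- Pre_ excludes exactly the inputs on which A raises: empty fdate_diff (A reads fdate_diff[0] up front → IndexError); B returns [] there
def Pre_name_change (fnames : List String) (fdate_diff : List String) : Prop := fdate_diff ≠ []
instance (fnames : List String) (fdate_diff : List String) : Decidable (Pre_name_change fnames fdate_diff) := by unfold Pre_name_change; infer_instance

def pvWitness_name_change : List String × List String := (["a.txt", "b.txt"], ["1", "1"])

def Spec_name_change (fnames : List String) (fdate_diff : List String) (out : List String) : Prop := out = name_change_alt fnames fdate_diff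
instance (fnames : List String) (fdate_diff : List String) (out : List String) : Decidable (Spec_name_change fnames fdate_diff out) := by unfold Spec_name_change; infer_instance

-- ===== CLAIM (what is proved, stated in full; the proofs are below) =====
def Claim_equal_name_change : Prop := ∀ (fnames : List String) (fdate_diff : List String), Dom_name_change fnames fdate_diff → Pre_name_change fnames fdate_diff → Spec_name_change fnames fdate_diff (name_change fnames fdate_diff)

-- ===== LEMMAS AND PROOFS =====

-- A's loop written without the accumulator
def pvCont (flag : String) (k : Int) : List (String × String) → List String
  | [] => []
  | (name, dd) :: rest =>
    if flag == dd then pvFmt dd k name :: pvCont flag (k + 1) rest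
    else pvFmt dd 0 name :: pvCont dd 1 rest

theorem pvAGo_eq_cont (l : List (String × String)) :
    ∀ (flag : String) (k : Int) (acc : List String),
    pvAGo flag k acc l = acc ++ pvCont flag k l := by
  induction l with
  | nil => intro flag k acc; simp [pvAGo, pvCont]
  | cons p rest ih =>
    intro flag k acc
    obtain ⟨name, dd⟩ := p
    simp only [pvAGo, pvCont]
    split <;> simp [ih]

theorem pvCont_eq_b (l : List (String × String)) :
    ∀ (flag : String) (k : Int),
    pvCont flag k l = (pvBEmit flag k l).1 ++ pvBGo (pvBEmit flag k l).2 := by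
  induction l with
  | nil => intro flag k; simp [pvCont, pvBEmit, pvBGo]
  | cons p rest ih =>
    intro flag k
    obtain ⟨name, dd⟩ := p
    simp only [pvCont, pvBEmit]
    by_cases h : flag = dd
    · subst h
      simp [ih]
    · have h1 : (flag == dd) = false := by simp [h]
      have h2 : (dd == flag) = false := by simp [Ne.symm h]
      simp only [h1, h2, if_neg Bool.false_ne_true, pvBGo]
      simp [ih]

-- ===== VERDICT (by name: the statement is the Claim_ definition above) =====
theorem name_change_spec : Claim_equal_name_change := by
  intro fnames fdate_diff _ hpre
  unfold Spec_name_change name_change name_change_alt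
  match fdate_diff, hpre with
  | d0 :: ds, _ =>
    cases fnames with
    | nil => simp [pvAGo, pvBGo]
    | cons n0 ns =>
      simp only [List.zip_cons_cons]
      rw [pvAGo_eq_cont]
      simp only [List.nil_append, pvCont, pvBGo]
      simp [pvCont_eq_b]
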